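-- pv_equiv track=rewrite | github.com/johnnichev/selectools | src/selectools/providers/anthropic_provider.py | _consume_think_buffer
-- ===== SOURCE A (Python) =====
-- _THINK_OPEN = "<think>"
--
-- _THINK_CLOSE = "</think>"
--
-- def _consume_think_buffer(buffer: str, in_think_block: bool) -> tuple[str, str, bool]:
--     """Consume a streaming text buffer, suppressing <think> reasoning blocks.
--
--     Returns ``(emit, remaining, in_think_block)`` where ``emit`` is the safe
--     text to yield to the consumer, ``remaining`` is the unprocessed tail (a
--     partial tag prefix or content inside an open block), and
--     ``in_think_block`` is the updated state flag.
--
--     The remaining buffer never includes safely emittable text, so the caller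
--     can yield ``emit`` immediately and re-feed new chunks into ``remaining``.
--     """
--     emit = ""
--     while buffer:
--         if in_think_block:
--             close_idx = buffer.find(_THINK_CLOSE)
--             if close_idx == -1:
--                 # Still inside the reasoning block; drop everything but
--                 # keep any suffix that could be the start of </think>.
--                 return emit, _retain_partial_suffix(buffer, _THINK_CLOSE), True
--             buffer = buffer[close_idx + len(_THINK_CLOSE) :]
--             in_think_block = False
--             continue
--
--         open_idx = buffer.find(_THINK_OPEN)
--         if open_idx == -1:
--             # No opening tag in buffer. Emit everything except a possible
--             # partial-prefix tail (e.g. trailing "<th") that could become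
--             # a real opening tag once more text arrives.
--             safe_len = len(buffer) - _partial_prefix_len(buffer, _THINK_OPEN)
--             emit += buffer[:safe_len]
--             return emit, buffer[safe_len:], False
--
--         emit += buffer[:open_idx]
--         buffer = buffer[open_idx + len(_THINK_OPEN) :]
--         in_think_block = True
--     return emit, "", in_think_block
--
-- def _partial_prefix_len(buffer: str, target: str) -> int:
--     """Return length of longest suffix of ``buffer`` that prefixes ``target``.
--
--     Used to hold back text that might be the start of a tag across chunks.
--     """
--     max_check = min(len(buffer), len(target) - 1)
--     for size in range(max_check, 0, -1):
--         if target.startswith(buffer[-size:]):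
--             return size
--     return 0
--
-- def _retain_partial_suffix(buffer: str, target: str) -> str:
--     """Return only the suffix of ``buffer`` that could be a prefix of ``target``.
--
--     Used while inside a <think> block to drop suppressed text but preserve
--     bytes that may complete a closing tag in the next chunk.
--     """
--     n = _partial_prefix_len(buffer, target)
--     return buffer[-n:] if n else ""
-- ===== SOURCE B (Python) =====
-- _THINK_OPEN = "<think>"
-- _THINK_CLOSE = "</think>"
--
-- def _consume_think_buffer(buffer: str, in_think_block: bool) -> tuple[str, str, bool]:
--     """Character-by-character finite state machine: track the in/out-of-block
--     state and the length of the partial match of the currently sought tag."""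
--     emit = []
--     k = 0
--     for c in buffer:
--         tag = _THINK_CLOSE if in_think_block else _THINK_OPEN
--         if c == tag[k]:
--             k += 1
--             if k == len(tag):
--                 in_think_block = not in_think_block
--                 k = 0
--         else:
--             if not in_think_block:
--                 emit.append(tag[:k])
--             # retry the current character as a fresh tag start ('<')
--             if c == "<":
--                 k = 1
--             else:
--                 k = 0
--                 if not in_think_block:
--                     emit.append(c)
--     tag = _THINK_CLOSE if in_think_block else _THINK_OPEN
--     return "".join(emit), tag[:k], in_think_block
-- ===== Notes on version B (the rewrite author's own statement) =====
-- stated objective: alternative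
-- what changed: Replaces the whole-buffer find/slice scanner (repeated str.find plus longest-suffix-prefix backscans) with a single character-at-a-time finite state machine that tracks the in-block flag and the match length of the currently sought tag.
import Mathlib
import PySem

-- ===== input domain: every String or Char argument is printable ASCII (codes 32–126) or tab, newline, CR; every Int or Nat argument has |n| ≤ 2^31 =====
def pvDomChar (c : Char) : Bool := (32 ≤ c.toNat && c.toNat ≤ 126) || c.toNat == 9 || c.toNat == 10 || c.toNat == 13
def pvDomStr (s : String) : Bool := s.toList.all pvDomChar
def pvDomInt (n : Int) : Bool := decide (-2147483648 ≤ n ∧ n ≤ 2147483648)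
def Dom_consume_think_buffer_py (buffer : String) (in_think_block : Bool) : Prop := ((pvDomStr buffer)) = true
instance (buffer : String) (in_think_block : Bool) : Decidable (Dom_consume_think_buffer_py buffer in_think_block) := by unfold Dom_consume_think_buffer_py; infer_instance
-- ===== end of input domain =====

-- B replaces A's whole-buffer find/slice scanner by a single character-at-a-time
-- finite state machine (state flag + partial-tag match length); objective: alternative.

-- ===== PORT A =====
-- module constants _THINK_OPEN / _THINK_CLOSE
def pvThinkOpen : String := "<think>"
def pvThinkClose : String := "</think>"

-- 'for size in range(max_check, 0, -1): if target.startswith(buffer[-size:]): return size' / 'return 0'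
def pvPplLoop (sizes : List Int) (buffer target : List Char) : Int :=
  match sizes with
  | [] => 0
  | size :: rest =>
    if PySem.Chars.startswith target (PySem.List.slice buffer (some (-size)) none) then size
    else pvPplLoop rest buffer target

-- _partial_prefix_len (on the code-point lists)
def pvPartialPrefixLen (buffer target : List Char) : Int :=
  let max_check : Int := min (PySem.Chars.len buffer) (PySem.Chars.len target - 1)
  pvPplLoop (PySem.List.pyRange max_check 0 (-1)) buffer target

-- _retain_partial_suffix: 'return buffer[-n:] if n else ""'
def pvRetainPartialSuffix (buffer target : List Char) : List Char :=
  let n := pvPartialPrefixLen buffer target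
  if n ≠ 0 then PySem.List.slice buffer (some (-n)) none else []

-- the 'while buffer:' loop of _consume_think_buffer
def pvLoopA (buffer : List Char) (in_think_block : Bool) (emit : List Char) :
    List Char × List Char × Bool :=
  if buffer = [] then (emit, [], in_think_block)
  else
    if in_think_block then
      let close_idx := PySem.Chars.find buffer pvThinkClose.toList
      if close_idx = -1 then (emit, pvRetainPartialSuffix buffer pvThinkClose.toList, true)
      else
        pvLoopA (PySem.List.slice buffer (some (close_idx + PySem.Chars.len pvThinkClose.toList)) none)
          false emit
    else
      let open_idx := PySem.Chars.find buffer pvThinkOpen.toList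
      if open_idx = -1 then
        let safe_len : Int := PySem.Chars.len buffer - pvPartialPrefixLen buffer pvThinkOpen.toList
        (emit ++ PySem.List.slice buffer none (some safe_len),
         PySem.List.slice buffer (some safe_len) none, false)
      else
        pvLoopA (PySem.List.slice buffer (some (open_idx + PySem.Chars.len pvThinkOpen.toList)) none)
          true (emit ++ PySem.List.slice buffer none (some open_idx))
termination_by buffer.length
decreasing_by
  all_goals
    have hb' : buffer ≠ [] := by assumption
    have hpos : 0 < buffer.length := List.length_pos_of_ne_nil hb'
    first
    | (have hf : ¬ PySem.Chars.find buffer pvThinkClose.toList = -1 := by assumption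
       have h0 : (0:Int) ≤ PySem.Chars.find buffer pvThinkClose.toList := by
         have := PySem.Chars.neg_one_le_find buffer pvThinkClose.toList; omega
       have hl : PySem.Chars.len pvThinkClose.toList = 8 := by decide
       rw [hl, PySem.List.slice_from buffer (by omega)]
       simp only [List.length_drop]; omega)
    | (have hf : ¬ PySem.Chars.find buffer pvThinkOpen.toList = -1 := by assumption
       have h0 : (0:Int) ≤ PySem.Chars.find buffer pvThinkOpen.toList := by
         have := PySem.Chars.neg_one_le_find buffer pvThinkOpen.toList; omega
       have hl : PySem.Chars.len pvThinkOpen.toList = 7 := by decide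
       rw [hl, PySem.List.slice_from buffer (by omega)]
       simp only [List.length_drop]; omega)

def consume_think_buffer_py (buffer : String) (in_think_block : Bool) : String × String × Bool :=
  let r := pvLoopA buffer.toList in_think_block []
  (String.ofList r.1, String.ofList r.2.1, r.2.2)

-- ===== PORT B =====
-- the tag currently sought by the state machine
def pvTagOf (in_think_block : Bool) : List Char :=
  if in_think_block then pvThinkClose.toList else pvThinkOpen.toList

-- the 'for c in buffer:' state machine of B (k = length of the current partial tag match)
def pvFsmB (l : List Char) (in_think_block : Bool) (k : Nat) (emit : List Char) :
    List Char × List Char × Bool :=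
  match l with
  | [] => (emit, (pvTagOf in_think_block).take k, in_think_block)
  | c :: cs =>
    let tag := pvTagOf in_think_block
    if tag[k]? = some c then
      if k + 1 = tag.length then pvFsmB cs (!in_think_block) 0 emit
      else pvFsmB cs in_think_block (k + 1) emit
    else
      let emit1 := if in_think_block then emit else emit ++ tag.take k
      if c = '<' then pvFsmB cs in_think_block 1 emit1
      else pvFsmB cs in_think_block 0 (if in_think_block then emit1 else emit1 ++ [c])

def consume_think_buffer_py_alt (buffer : String) (in_think_block : Bool) : String × String × Bool :=
  let r := pvFsmB buffer.toList in_think_block 0 []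
  (String.ofList r.1, String.ofList r.2.1, r.2.2)

-- ===== PRECONDITION & SPEC =====
def Spec_consume_think_buffer_py (buffer : String) (in_think_block : Bool) (out : String × String × Bool) : Prop := out = consume_think_buffer_py_alt buffer in_think_block
instance (buffer : String) (in_think_block : Bool) (out : String × String × Bool) : Decidable (Spec_consume_think_buffer_py buffer in_think_block out) := by unfold Spec_consume_think_buffer_py; infer_instance

-- ===== CLAIM (what is proved, stated in full; the proofs are below) =====
def Claim_equal_consume_think_buffer_py : Prop := ∀ (buffer : String) (in_think_block : Bool), Dom_consume_think_buffer_py buffer in_think_block → Spec_consume_think_buffer_py buffer in_think_block (consume_think_buffer_py buffer in_think_block)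

-- ===== LEMMAS AND PROOFS =====

lemma pvPplLoop_append_fail (l1 l2 : List Int) (buffer target : List Char)
    (h : ∀ s ∈ l1, PySem.Chars.startswith target (PySem.List.slice buffer (some (-s)) none) = false) :
    pvPplLoop (l1 ++ l2) buffer target = pvPplLoop l2 buffer target := by
  induction l1 with
  | nil => rfl
  | cons a l ih =>
    simp only [List.cons_append, pvPplLoop, h a (by simp), Bool.false_eq_true, if_false]
    exact ih (fun s hs => h s (by simp [hs]))

lemma pvPplLoop_congr (sizes : List Int) (b1 b2 target : List Char)
    (h : ∀ s ∈ sizes, PySem.List.slice b1 (some (-s)) none = PySem.List.slice b2 (some (-s)) none) :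
    pvPplLoop sizes b1 target = pvPplLoop sizes b2 target := by
  induction sizes with
  | nil => rfl
  | cons a l ih =>
    simp only [pvPplLoop, h a (by simp)]
    split <;> [rfl; exact ih (fun s hs => h s (by simp [hs]))]

lemma pvPplLoop_zero_or_mem (sizes : List Int) (buffer target : List Char) :
    pvPplLoop sizes buffer target = 0 ∨ pvPplLoop sizes buffer target ∈ sizes := by
  induction sizes with
  | nil => left; rfl
  | cons a l ih =>
    simp only [pvPplLoop]
    split
    · right; simp
    · rcases ih with h | h
      · left; exact h
      · right; simp [h]

lemma pvPyRange_desc (a : Nat) (ha : a ≤ 8) :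
    PySem.List.pyRange (a : Int) 0 (-1) = ((List.range' 1 a).reverse).map (fun n : Nat => (n : Int)) := by
  interval_cases a <;> decide

lemma pvPpl_eq (buffer target : List Char) (ht1 : 1 ≤ target.length) (ht8 : target.length ≤ 8) :
    pvPartialPrefixLen buffer target =
      pvPplLoop (((List.range' 1 (min buffer.length (target.length - 1))).reverse).map (fun n : Nat => (n : Int)))
        buffer target := by
  unfold pvPartialPrefixLen
  have hmin : min (PySem.Chars.len buffer) (PySem.Chars.len target - 1)
      = ((min buffer.length (target.length - 1) : Nat) : Int) := by
    simp only [PySem.Chars.len_eq]; omega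
  simp only [hmin, pvPyRange_desc (min buffer.length (target.length - 1)) (by omega)]

lemma pvPpl_bounds (buffer target : List Char) (ht1 : 1 ≤ target.length) (ht8 : target.length ≤ 8) :
    0 ≤ pvPartialPrefixLen buffer target ∧
      pvPartialPrefixLen buffer target ≤ ((min buffer.length (target.length - 1) : Nat) : Int) := by
  rw [pvPpl_eq buffer target ht1 ht8]
  rcases pvPplLoop_zero_or_mem (((List.range' 1 (min buffer.length (target.length - 1))).reverse).map
    (fun n : Nat => (n : Int))) buffer target with h | h
  · rw [h]; constructor <;> omega
  · simp only [List.mem_map, List.mem_reverse, List.mem_range'_1] at h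
    obtain ⟨n, ⟨h1, h2⟩, hn⟩ := h
    rw [← hn]; constructor <;> omega

lemma pvPpl_append (q r target : List Char) (ht1 : 1 ≤ target.length) (ht8 : target.length ≤ 8)
    (h : ∀ i < q.length, ¬ ((q ++ r).drop i <+: target)) :
    pvPartialPrefixLen (q ++ r) target = pvPartialPrefixLen r target := by
  rw [pvPpl_eq _ _ ht1 ht8, pvPpl_eq _ _ ht1 ht8]
  have hE : min r.length (target.length - 1) ≤ min (q ++ r).length (target.length - 1) := by
    apply le_min
    · exact le_trans (Nat.min_le_left _ _) (by simp only [List.length_append]; omega)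
    · exact Nat.min_le_right _ _
  have hsplit : List.range' 1 (min (q ++ r).length (target.length - 1))
      = List.range' 1 (min r.length (target.length - 1)) ++
        List.range' (1 + 1 * min r.length (target.length - 1))
          (min (q ++ r).length (target.length - 1) - min r.length (target.length - 1)) := by
    rw [List.range'_append]
    congr 1
    omega
  rw [hsplit, List.reverse_append, List.map_append]
  have hfail : ∀ sz ∈ (List.range' (1 + 1 * min r.length (target.length - 1))
      (min (q ++ r).length (target.length - 1) - min r.length (target.length - 1))).reverse.map
        (fun n : Nat => (n : Int)),
      PySem.Chars.startswith target (PySem.List.slice (q ++ r) (some (-sz)) none) = false := by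
    intro sz hsz
    simp only [List.mem_map, List.mem_reverse, List.mem_range'_1] at hsz
    obtain ⟨n, ⟨h1, h2⟩, hn⟩ := hsz
    have hmb1 : min (q ++ r).length (target.length - 1) ≤ (q ++ r).length := Nat.min_le_left _ _
    have hrn : r.length < n := by
      rcases Nat.le_total r.length (target.length - 1) with hc | hc
      · rw [Nat.min_eq_left hc] at h1; omega
      · rw [Nat.min_eq_right hc] at h1
        have := Nat.min_le_right (q ++ r).length (target.length - 1)
        omega
    rw [← hn, PySem.List.slice_from_neg_natCast (q ++ r) n (by omega)]
    apply Bool.eq_false_iff.mpr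
    intro hb
    refine h ((q ++ r).length - n) ?_ ((PySem.Chars.startswith_iff _ _).mp hb)
    simp only [List.length_append] at hmb1 h2 ⊢
    omega
  rw [pvPplLoop_append_fail _ _ _ _ hfail]
  apply pvPplLoop_congr
  intro sz hsz
  simp only [List.mem_map, List.mem_reverse, List.mem_range'_1] at hsz
  obtain ⟨n, ⟨h1, h2⟩, hn⟩ := hsz
  have hnr : n ≤ r.length := by
    have := Nat.min_le_left r.length (target.length - 1)
    omega
  rw [← hn, PySem.List.slice_from_neg_natCast (q ++ r) n (by omega),
      PySem.List.slice_from_neg_natCast r n (by omega)]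
  calc (q ++ r).drop ((q ++ r).length - n)
      = (q ++ r).drop (q.length + (r.length - n)) := by
        simp only [List.length_append]; congr 1; omega
    _ = r.drop (r.length - n) := List.drop_length_add_append _

lemma pvPpl_take (t : List Char) (k : Nat) (ht1 : 1 ≤ t.length) (ht8 : t.length ≤ 8)
    (hk : k ≤ t.length - 1) :
    pvPartialPrefixLen (t.take k) t = (k : Int) := by
  rw [pvPpl_eq _ _ ht1 ht8]
  have hmin : min (t.take k).length (t.length - 1) = k := by
    rw [List.length_take]; omega
  rw [hmin]
  cases k with
  | zero => rfl
  | succ m =>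
    rw [List.range'_concat, List.reverse_append, List.map_append]
    simp only [List.reverse_cons, List.reverse_nil, List.nil_append, List.map_cons,
      List.map_nil, List.cons_append, pvPplLoop]
    rw [PySem.List.slice_from_neg_natCast (t.take (m + 1)) (1 + 1 * m) (by omega)]
    have hlt : (t.take (m + 1)).length = m + 1 := by rw [List.length_take]; omega
    have hdrop : (t.take (m + 1)).drop ((t.take (m + 1)).length - (1 + 1 * m)) = t.take (m + 1) := by
      rw [hlt, show m + 1 - (1 + 1 * m) = 0 by omega, List.drop_zero]
    rw [hdrop, (PySem.Chars.startswith_iff t (t.take (m + 1))).mpr (List.take_prefix _ _)]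
    simp only [if_true]
    omega

lemma pvFind_prefix_zero (s t : List Char) (hp : t <+: s) :
    PySem.Chars.find s t = 0 := by
  have h0 : 0 ≤ PySem.Chars.find s t := (PySem.Chars.find_nonneg_iff s t).mpr hp.isInfix
  obtain ⟨_, hmin⟩ := PySem.Chars.find_spec h0
  rcases Nat.eq_zero_or_pos (PySem.Chars.find s t).toNat with hz | hpos
  · omega
  · exact absurd (by simpa using hp) (by simpa using hmin 0 hpos)

lemma pvFind_shift (q r t : List Char)
    (h : ∀ i < q.length, ¬ t <+: (q ++ r).drop i) :
    (PySem.Chars.find (q ++ r) t = -1 ∧ PySem.Chars.find r t = -1) ∨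
      (0 ≤ PySem.Chars.find r t ∧
        PySem.Chars.find (q ++ r) t = (q.length : Int) + PySem.Chars.find r t) := by
  by_cases hi : t <:+: (q ++ r)
  · right
    have h0 : 0 ≤ PySem.Chars.find (q ++ r) t := (PySem.Chars.find_nonneg_iff _ _).mpr hi
    obtain ⟨hocc, hmin⟩ := PySem.Chars.find_spec h0
    set j := (PySem.Chars.find (q ++ r) t).toNat with hj
    have hjq : q.length ≤ j := by
      by_contra hlt
      exact h j (by omega) hocc
    have hdrop : (q ++ r).drop j = r.drop (j - q.length) := by
      calc (q ++ r).drop j = (q ++ r).drop (q.length + (j - q.length)) := by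
              rw [Nat.add_sub_cancel' hjq]
        _ = r.drop (j - q.length) := List.drop_length_add_append _
    have hrinf : t <:+: r := by
      rw [hdrop] at hocc
      exact hocc.isInfix.trans (List.drop_suffix _ _).isInfix
    have h0' : 0 ≤ PySem.Chars.find r t := (PySem.Chars.find_nonneg_iff _ _).mpr hrinf
    obtain ⟨hocc', hmin'⟩ := PySem.Chars.find_spec h0'
    set j' := (PySem.Chars.find r t).toNat with hj'
    have hle1 : j' ≤ j - q.length := by
      by_contra hlt
      exact hmin' (j - q.length) (by omega) (hdrop ▸ hocc)
    have hle2 : j ≤ q.length + j' := by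
      by_contra hlt
      refine hmin (q.length + j') (by omega) ?_
      rw [List.drop_length_add_append]
      exact hocc'
    exact ⟨h0', by omega⟩
  · left
    refine ⟨(PySem.Chars.find_eq_neg_one_iff _ _).mpr hi, (PySem.Chars.find_eq_neg_one_iff _ _).mpr ?_⟩
    exact fun hr => hi (hr.trans (List.suffix_append q r).isInfix)


lemma pvTag_len (inb : Bool) : 1 ≤ (pvTagOf inb).length ∧ (pvTagOf inb).length ≤ 8 := by
  cases inb <;> decide

lemma pvTag_head (inb : Bool) : (pvTagOf inb)[0]? = some '<' := by
  cases inb <;> decide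

lemma pvTag_no_lt (inb : Bool) (i : Nat) (h1 : 1 ≤ i) (h2 : i < (pvTagOf inb).length) :
    (pvTagOf inb)[i]? ≠ some '<' := by
  cases inb <;>
    (simp only [pvTagOf, pvThinkClose, pvThinkOpen, if_true, if_false, Bool.false_eq_true] at h2 ⊢ <;>
      first
      | (have : i < 8 := by simpa using h2
         interval_cases i <;> simp_all <;> decide)
      | (have : i < 7 := by simpa using h2
         interval_cases i <;> simp_all <;> decide))

-- around a mismatch of the tag at position k, no occurrence of the tag and no
-- tag-prefix suffix can start at or before the mismatch
lemma pvNoTagAround (inb : Bool) (k : Nat) (c : Char) (cs : List Char)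
    (hk : k < (pvTagOf inb).length) (hc : (pvTagOf inb)[k]? ≠ some c) :
    ∀ i, (i < k ∨ (i = k ∧ c ≠ '<')) →
      ¬ (pvTagOf inb) <+: ((pvTagOf inb).take k ++ c :: cs).drop i ∧
      ¬ ((pvTagOf inb).take k ++ c :: cs).drop i <+: (pvTagOf inb) := by
  intro i hi
  set t := pvTagOf inb with hT
  set s := t.take k ++ c :: cs with hS
  have hlt : (t.take k).length = k := by rw [List.length_take]; omega
  have hsk : s[k]? = some c := by
    rw [hS, List.getElem?_append_right (by omega), hlt]
    simp
  have hsi : ∀ j < k, s[j]? = t[j]? := by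
    intro j hj
    rw [hS, List.getElem?_append_left (by omega), List.getElem?_take_of_lt hj]
  have hslen : k < s.length := by
    rw [hS, List.length_append, hlt]; simp
  have hilen : i ≤ k := by omega
  constructor
  · intro hpre
    rcases Nat.eq_zero_or_pos i with hz | hpos
    · subst hz
      rw [List.drop_zero] at hpre
      obtain ⟨u, hu⟩ := hpre
      have : s[k]? = t[k]? := by
        rw [← hu, List.getElem?_append_left hk]
      rw [hsk] at this
      exact hc this.symm
    · obtain ⟨u, hu⟩ := hpre
      have h0 : (s.drop i)[0]? = t[0]? := by
        rw [← hu, List.getElem?_append_left (by omega)]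
      rw [List.getElem?_drop, Nat.add_zero, pvTag_head] at h0
      rcases hi with hik | ⟨rfl, hne⟩
      · rw [hsi i hik] at h0
        exact pvTag_no_lt inb i hpos (hik.trans hk) h0
      · rw [hsk] at h0
        exact hne (by injection h0)
  · intro hpre
    rcases Nat.eq_zero_or_pos i with hz | hpos
    · subst hz
      rw [List.drop_zero] at hpre
      obtain ⟨u, hu⟩ := hpre
      have : t[k]? = s[k]? := by
        rw [← hu, List.getElem?_append_left hslen]
      rw [hsk] at this
      exact hc this
    · have hne : s.drop i ≠ [] := by
        intro hnil
        have := List.drop_eq_nil_iff.mp hnil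
        rw [hS, List.length_append, hlt] at this
        simp only [List.length_cons] at this
        omega
      obtain ⟨u, hu⟩ := hpre
      have h0 : t[0]? = (s.drop i)[0]? := by
        rw [← hu, List.getElem?_append_left (by
          cases hdi : s.drop i with
          | nil => exact absurd hdi hne
          | cons a l => simp)]
      rw [List.getElem?_drop, Nat.add_zero, pvTag_head] at h0
      rcases hi with hik | ⟨rfl, hne'⟩
      · rw [hsi i hik] at h0
        exact pvTag_no_lt inb i hpos (hik.trans hk) h0.symm
      · rw [hsk] at h0
        exact hne' (by injection h0.symm)


lemma pvLoopA_take (inb : Bool) (k : Nat) (emit : List Char) (hk : k < (pvTagOf inb).length) :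
    pvLoopA ((pvTagOf inb).take k) inb emit = (emit, (pvTagOf inb).take k, inb) := by
  rcases Nat.eq_zero_or_pos k with rfl | hpos
  · rw [pvLoopA]; simp
  · have hne : (pvTagOf inb).take k ≠ [] := by
      apply List.ne_nil_of_length_pos; rw [List.length_take]; omega
    have hlt : ((pvTagOf inb).take k).length = k := by rw [List.length_take]; omega
    have hfind : PySem.Chars.find ((pvTagOf inb).take k) (pvTagOf inb) = -1 := by
      apply (PySem.Chars.find_eq_neg_one_iff _ _).mpr
      intro hinf
      have := hinf.length_le
      omega
    have hppl : pvPartialPrefixLen ((pvTagOf inb).take k) (pvTagOf inb) = (k : Int) :=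
      pvPpl_take _ _ (pvTag_len inb).1 (pvTag_len inb).2 (by omega)
    cases inb
    · simp only [pvTagOf, Bool.false_eq_true, if_false] at hne hlt hfind hppl hk ⊢
      rw [pvLoopA, if_neg hne]
      simp only [Bool.false_eq_true, reduceIte, hfind, PySem.Chars.len_eq, hlt, hppl, sub_self]
      rw [PySem.List.slice_to _ (le_refl 0), PySem.List.slice_from _ (le_refl 0)]
      simp [pvTagOf]
    · simp only [pvTagOf, eq_self_iff_true, if_true] at hne hlt hfind hppl hk ⊢
      rw [pvLoopA, if_neg hne]
      simp only [reduceIte, hfind, pvRetainPartialSuffix, hppl]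
      rw [if_pos (by omega : (k : Int) ≠ 0),
        PySem.List.slice_from_neg_natCast _ k hpos, hlt]
      simp [pvTagOf]

lemma pvLoopA_tag (inb : Bool) (cs emit : List Char) :
    pvLoopA (pvTagOf inb ++ cs) inb emit = pvLoopA cs (!inb) emit := by
  have hne : pvTagOf inb ++ cs ≠ [] := by
    cases inb <;> simp [pvTagOf, pvThinkOpen, pvThinkClose]
  have hf : PySem.Chars.find (pvTagOf inb ++ cs) (pvTagOf inb) = 0 :=
    pvFind_prefix_zero _ _ (List.prefix_append _ _)
  cases inb
  · simp only [pvTagOf, Bool.false_eq_true, if_false] at hne hf ⊢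
    rw [pvLoopA, if_neg hne]
    simp only [Bool.false_eq_true, reduceIte, hf, zero_add]
    rw [if_neg (by norm_num : ¬((0:Int) = -1))]
    have hlen : PySem.Chars.len pvThinkOpen.toList = 7 := by decide
    rw [hlen, PySem.List.slice_from _ (by norm_num : (0:Int) ≤ 7),
      PySem.List.slice_to _ (le_refl 0)]
    have : ((7:Int).toNat) = pvThinkOpen.toList.length := by decide
    rw [this, List.drop_left]
    simp [Bool.not_false]
  · simp only [pvTagOf, eq_self_iff_true, if_true] at hne hf ⊢
    rw [pvLoopA, if_neg hne]
    simp only [reduceIte, hf, zero_add]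
    rw [if_neg (by norm_num : ¬((0:Int) = -1))]
    have hlen : PySem.Chars.len pvThinkClose.toList = 8 := by decide
    rw [hlen, PySem.List.slice_from _ (by norm_num : (0:Int) ≤ 8)]
    have : ((8:Int).toNat) = pvThinkClose.toList.length := by decide
    rw [this, List.drop_left]
    simp [Bool.not_true]

-- stepping pvLoopA over a dead prefix q (no tag occurrence and no tag-prefix
-- suffix starts inside q): outside a block q is emitted, inside it is dropped
lemma pvLoopA_skip (inb : Bool) (q r emit : List Char)
    (hocc : ∀ i < q.length, ¬ (pvTagOf inb) <+: (q ++ r).drop i)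
    (hsuf : ∀ i < q.length, ¬ ((q ++ r).drop i <+: pvTagOf inb)) :
    pvLoopA (q ++ r) inb emit = pvLoopA r inb (if inb then emit else emit ++ q) := by
  by_cases hq : q = []
  · subst hq; cases inb <;> simp
  have hqr : q ++ r ≠ [] := by simp [hq]
  have ht1 := (pvTag_len inb).1
  have ht8 := (pvTag_len inb).2
  rcases pvFind_shift q r (pvTagOf inb) hocc with ⟨hf1, hf2⟩ | ⟨h0', hf⟩
  · -- no occurrence of the tag anywhere: both loops stop
    have hppl := pvPpl_append q r (pvTagOf inb) ht1 ht8 hsuf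
    have hpplb := pvPpl_bounds r (pvTagOf inb) ht1 ht8
    have hsl : ∀ m : Nat, 0 < m → m ≤ r.length →
        PySem.List.slice (q ++ r) (some (-(m : Int))) none = PySem.List.slice r (some (-(m : Int))) none := by
      intro m hm hmr
      rw [PySem.List.slice_from_neg_natCast _ m hm, PySem.List.slice_from_neg_natCast _ m hm]
      calc (q ++ r).drop ((q ++ r).length - m)
          = (q ++ r).drop (q.length + (r.length - m)) := by
            simp only [List.length_append]; congr 1; omega
        _ = r.drop (r.length - m) := List.drop_length_add_append _
    by_cases hr : r = []
    · subst hr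
      have hppl0 : pvPartialPrefixLen (q ++ ([] : List Char)) (pvTagOf inb) = 0 := by
        rw [hppl]; cases inb <;> decide
      cases inb
      · rw [pvLoopA, if_neg hqr]
        simp only [pvTagOf, Bool.false_eq_true, reduceIte] at hf1 hppl0 ⊢
        simp only [hf1, reduceIte, hppl0, PySem.Chars.len_eq, sub_zero]
        rw [PySem.List.slice_to _ (by omega), PySem.List.slice_from _ (by omega)]
        simp [pvLoopA]
      · rw [pvLoopA, if_neg hqr]
        simp only [pvTagOf, reduceIte] at hf1 hppl0 ⊢
        simp only [hf1, reduceIte, pvRetainPartialSuffix, hppl0]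
        simp [pvLoopA]
    · -- r nonempty, tag still absent: results agree piecewise
      cases inb
      · rw [pvLoopA, if_neg hqr]
        conv_rhs => rw [pvLoopA, if_neg hr]
        simp only [pvTagOf, Bool.false_eq_true, reduceIte] at hf1 hf2 hppl hpplb hsuf ⊢
        simp only [hf1, hf2, reduceIte, PySem.Chars.len_eq, hppl]
        set n := pvPartialPrefixLen r pvThinkOpen.toList with hn
        have hnn : 0 ≤ n := hpplb.1
        have hnr : n ≤ (r.length : Int) := le_trans hpplb.2 (by simp)
        have htake : PySem.List.slice (q ++ r) none (some ((q ++ r).length - n))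
            = q ++ PySem.List.slice r none (some ((r.length : Int) - n)) := by
          rw [PySem.List.slice_to _ (by simp only [List.length_append]; omega),
            PySem.List.slice_to _ (by omega)]
          calc (q ++ r).take (((q ++ r).length : Int) - n).toNat
              = (q ++ r).take (q.length + ((r.length : Int) - n).toNat) := by
                congr 1; simp only [List.length_append]; omega
            _ = q ++ r.take (((r.length : Int) - n).toNat) := List.take_length_add_append _
        have hdrop : PySem.List.slice (q ++ r) (some ((q ++ r).length - n)) none
            = PySem.List.slice r (some ((r.length : Int) - n)) none := by
          rw [PySem.List.slice_from _ (by simp only [List.length_append]; omega),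
            PySem.List.slice_from _ (by omega)]
          calc (q ++ r).drop (((q ++ r).length : Int) - n).toNat
              = (q ++ r).drop (q.length + ((r.length : Int) - n).toNat) := by
                congr 1; simp only [List.length_append]; omega
            _ = r.drop (((r.length : Int) - n).toNat) := List.drop_length_add_append _
        rw [htake, hdrop]
        simp
      · rw [pvLoopA, if_neg hqr]
        conv_rhs => rw [pvLoopA, if_neg hr]
        simp only [pvTagOf, reduceIte] at hf1 hf2 hppl hpplb hsuf ⊢
        simp only [hf1, hf2, reduceIte, pvRetainPartialSuffix, hppl]
        set n := pvPartialPrefixLen r pvThinkClose.toList with hn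
        have hnn : 0 ≤ n := hpplb.1
        have hnr : n ≤ (r.length : Int) := le_trans hpplb.2 (by simp)
        by_cases hn0 : n = 0
        · simp [hn0]
        · rw [if_pos hn0, if_pos hn0]
          have hsl' := hsl n.toNat (by omega) (by omega)
          rw [show -(n.toNat : Int) = -n by omega] at hsl'
          rw [hsl']
  · -- the tag occurs in r: both loops recurse on the same tail
    have hrne : r ≠ [] := by
      intro hrnil
      subst hrnil
      have hn : PySem.Chars.find ([] : List Char) (pvTagOf inb) = -1 := by
        apply (PySem.Chars.find_eq_neg_one_iff _ _).mpr
        intro hinf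
        have := hinf.length_le
        simp only [List.length_nil] at this
        omega
      omega
    have hjlen := PySem.Chars.find_le_length r (pvTagOf inb)
    have hdrop : ∀ L : Int, 0 ≤ L →
        PySem.List.slice (q ++ r) (some ((q.length : Int) + PySem.Chars.find r (pvTagOf inb) + L)) none
          = PySem.List.slice r (some (PySem.Chars.find r (pvTagOf inb) + L)) none := by
      intro L hL
      have hb1 : (0:Int) ≤ (q.length : Int) + PySem.Chars.find r (pvTagOf inb) + L := by omega
      have hb2 : (0:Int) ≤ PySem.Chars.find r (pvTagOf inb) + L := by omega
      rw [PySem.List.slice_from _ hb1, PySem.List.slice_from _ hb2]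
      calc (q ++ r).drop ((q.length : Int) + PySem.Chars.find r (pvTagOf inb) + L).toNat
          = (q ++ r).drop (q.length + (PySem.Chars.find r (pvTagOf inb) + L).toNat) := by
            congr 1; omega
        _ = r.drop ((PySem.Chars.find r (pvTagOf inb) + L).toNat) := List.drop_length_add_append _
    have htake : PySem.List.slice (q ++ r) none (some ((q.length : Int) + PySem.Chars.find r (pvTagOf inb)))
        = q ++ PySem.List.slice r none (some (PySem.Chars.find r (pvTagOf inb))) := by
      have hb1 : (0:Int) ≤ (q.length : Int) + PySem.Chars.find r (pvTagOf inb) := by omega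
      rw [PySem.List.slice_to _ hb1, PySem.List.slice_to _ h0']
      calc (q ++ r).take ((q.length : Int) + PySem.Chars.find r (pvTagOf inb)).toNat
          = (q ++ r).take (q.length + (PySem.Chars.find r (pvTagOf inb)).toNat) := by
            congr 1; omega
        _ = q ++ r.take ((PySem.Chars.find r (pvTagOf inb)).toNat) := List.take_length_add_append _
    cases inb
    · simp only [pvTagOf, Bool.false_eq_true, reduceIte] at hf h0' hjlen hdrop htake ⊢
      rw [pvLoopA, if_neg hqr]
      conv_rhs => rw [pvLoopA, if_neg hrne]
      simp only [Bool.false_eq_true, reduceIte, hf]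
      rw [if_neg (by omega), if_neg (by omega)]
      rw [hdrop _ (by rw [PySem.Chars.len_eq]; omega), htake]
      simp
    · simp only [pvTagOf, reduceIte] at hf h0' hjlen hdrop htake ⊢
      rw [pvLoopA, if_neg hqr]
      conv_rhs => rw [pvLoopA, if_neg hrne]
      simp only [reduceIte, hf]
      rw [if_neg (by omega), if_neg (by omega)]
      rw [hdrop _ (by rw [PySem.Chars.len_eq]; omega)]

-- the FSM with a partial match of length k equals A's loop run on (tag-prefix of length k) ++ rest
lemma pvMain (l : List Char) : ∀ (inb : Bool) (k : Nat) (emit : List Char),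
    k < (pvTagOf inb).length →
    pvFsmB l inb k emit = pvLoopA ((pvTagOf inb).take k ++ l) inb emit := by
  induction l with
  | nil =>
    intro inb k emit hk
    simp only [pvFsmB]
    rw [List.append_nil, pvLoopA_take inb k emit hk]
  | cons c cs ih =>
    intro inb k emit hk
    by_cases hm : (pvTagOf inb)[k]? = some c
    · by_cases hfull : k + 1 = (pvTagOf inb).length
      · have htag : (pvTagOf inb).take k ++ c :: cs = pvTagOf inb ++ cs := by
          have h1 : (pvTagOf inb).take k ++ [c] = pvTagOf inb := by
            calc (pvTagOf inb).take k ++ [c]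
                = (pvTagOf inb).take k ++ ((pvTagOf inb)[k]?).toList := by rw [hm]; rfl
              _ = (pvTagOf inb).take (k + 1) := (List.take_succ).symm
              _ = pvTagOf inb := by rw [hfull, List.take_length]
          calc (pvTagOf inb).take k ++ c :: cs
              = ((pvTagOf inb).take k ++ [c]) ++ cs := by simp
            _ = pvTagOf inb ++ cs := by rw [h1]
        simp only [pvFsmB]
        rw [if_pos hm, if_pos hfull, htag, pvLoopA_tag]
        have := ih (!inb) 0 emit (by have := (pvTag_len (!inb)).1; omega)
        simpa using this
      · have hk1 : k + 1 < (pvTagOf inb).length := lt_of_le_of_ne (Nat.succ_le_of_lt hk) hfull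
        have htag : (pvTagOf inb).take k ++ c :: cs = (pvTagOf inb).take (k + 1) ++ cs := by
          calc (pvTagOf inb).take k ++ c :: cs
              = ((pvTagOf inb).take k ++ [c]) ++ cs := by simp
            _ = ((pvTagOf inb).take k ++ ((pvTagOf inb)[k]?).toList) ++ cs := by rw [hm]; rfl
            _ = (pvTagOf inb).take (k + 1) ++ cs := by rw [← List.take_succ]
        simp only [pvFsmB]
        rw [if_pos hm, if_neg hfull, htag]
        exact ih inb (k + 1) emit hk1
    · have hna := pvNoTagAround inb k c cs hk hm
      by_cases hlt : c = '<'
      · subst hlt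
        simp only [pvFsmB]
        rw [if_neg hm, if_pos trivial]
        have h1 : (pvTagOf inb).take 1 = ['<'] := by cases inb <;> decide
        have hskip := pvLoopA_skip inb ((pvTagOf inb).take k) ('<' :: cs) emit
          (fun i hi => (hna i (Or.inl (by rwa [List.length_take, Nat.min_eq_left hk.le] at hi))).1)
          (fun i hi => (hna i (Or.inl (by rwa [List.length_take, Nat.min_eq_left hk.le] at hi))).2)
        rw [hskip, show ('<' :: cs) = (pvTagOf inb).take 1 ++ cs by rw [h1]; rfl]
        cases inb
        · simp only [Bool.false_eq_true, reduceIte]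
          exact ih false 1 (emit ++ (pvTagOf false).take k) (by decide)
        · simp only [reduceIte]
          exact ih true 1 emit (by decide)
      · simp only [pvFsmB]
        rw [if_neg hm, if_neg hlt]
        have hqlen : ((pvTagOf inb).take k ++ [c]).length = k + 1 := by
          rw [List.length_append, List.length_take, Nat.min_eq_left hk.le]; rfl
        have hassoc : ((pvTagOf inb).take k ++ [c]) ++ cs = (pvTagOf inb).take k ++ c :: cs := by simp
        have hskip := pvLoopA_skip inb ((pvTagOf inb).take k ++ [c]) cs emit
          (fun i hi => by
            rw [hassoc]
            rw [hqlen] at hi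
            rcases Nat.lt_succ_iff_lt_or_eq.mp hi with h | h
            · exact (hna i (Or.inl h)).1
            · exact (hna i (Or.inr ⟨h, hlt⟩)).1)
          (fun i hi => by
            rw [hassoc]
            rw [hqlen] at hi
            rcases Nat.lt_succ_iff_lt_or_eq.mp hi with h | h
            · exact (hna i (Or.inl h)).2
            · exact (hna i (Or.inr ⟨h, hlt⟩)).2)
        rw [← hassoc, hskip]
        cases inb
        · simp only [Bool.false_eq_true, reduceIte]
          have := ih false 0 ((emit ++ (pvTagOf false).take k) ++ [c]) (by decide)
          simp only [List.take_zero, List.nil_append] at this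
          rw [this]
          simp
        · simp only [reduceIte]
          have := ih true 0 emit (by decide)
          simp only [List.take_zero, List.nil_append] at this
          rw [this]

-- ===== VERDICT (by name: the statement is the Claim_ definition above) =====
theorem consume_think_buffer_py_spec : Claim_equal_consume_think_buffer_py := by
  intro buffer inb _
  unfold Spec_consume_think_buffer_py consume_think_buffer_py consume_think_buffer_py_alt
  have h := pvMain buffer.toList inb 0 [] (by have := (pvTag_len inb).1; omega)
  simp only [List.take_zero, List.nil_append] at h
  rw [h]
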